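-- pv_equiv track=rewrite | github.com/mauwie1/Semantic-Segmentation- | segmentation.py | getPixelMaskDict
-- ===== SOURCE A (Python) =====
-- def getPixelMaskDict(img, output):
--     pixel_mask_dict = {"noMask":[]}
--     count=0
--     while count<len(output['masks'][0][0]): #Create an empty list of pixels per mask, which eventually will include the pixels.
--         pixel_mask_dict["Mask " + str(count+1)]=[]
--         count+=1
--     c = 0
--     while c < len(img): # It puts the pixels in the appropriate mask list, where its mask value is True
--         row = img[c]
--         maskrow = output['masks'][c]
--         c2 = 0
--         while c2 < len(row):
--             rgbval = row[c2]
--             maskval = maskrow[c2]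
--             c3 = 0
--             appended=False
--             while c3 < len(maskval):
--                 if maskval[c3] == True:
--                     pixel_mask_dict["Mask " + str(c3+1)].append(c * len(row) + c2)
--                     appended=True
--                 c3 += 1
--             if appended==False:
--                 pixel_mask_dict["noMask"].append(c * len(row) + c2)
--             c2 += 1
--         c += 1
--     return pixel_mask_dict
-- ===== SOURCE B (Python) =====
-- def getPixelMaskDict(img, output):
--     masks = output['masks']
--     n = len(masks[0][0])
--     result = {"noMask": []}
--     for c3 in range(n):
--         result["Mask " + str(c3 + 1)] = [
--             c * len(img[c]) + c2
--             for c in range(len(img))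
--             for c2 in range(len(img[c]))
--             if c3 < len(masks[c][c2]) and masks[c][c2][c3] == True
--         ]
--     result["noMask"] = [
--         c * len(img[c]) + c2
--         for c in range(len(img))
--         for c2 in range(len(img[c]))
--         if not any(v == True for v in masks[c][c2])
--     ]
--     return result
-- ===== Notes on version B (the rewrite author's own statement) =====
-- stated objective: alternative
-- what changed: Pixel-major nested while-loops threading an 'appended' flag and mutating per-mask lists one element at a time are replaced by a mask-major decomposition: each 'Mask k' list is built whole by one comprehension pass over the pixels, and 'noMask' by a final pass keeping pixels whose mask vector contains no True.
import Mathlib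
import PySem

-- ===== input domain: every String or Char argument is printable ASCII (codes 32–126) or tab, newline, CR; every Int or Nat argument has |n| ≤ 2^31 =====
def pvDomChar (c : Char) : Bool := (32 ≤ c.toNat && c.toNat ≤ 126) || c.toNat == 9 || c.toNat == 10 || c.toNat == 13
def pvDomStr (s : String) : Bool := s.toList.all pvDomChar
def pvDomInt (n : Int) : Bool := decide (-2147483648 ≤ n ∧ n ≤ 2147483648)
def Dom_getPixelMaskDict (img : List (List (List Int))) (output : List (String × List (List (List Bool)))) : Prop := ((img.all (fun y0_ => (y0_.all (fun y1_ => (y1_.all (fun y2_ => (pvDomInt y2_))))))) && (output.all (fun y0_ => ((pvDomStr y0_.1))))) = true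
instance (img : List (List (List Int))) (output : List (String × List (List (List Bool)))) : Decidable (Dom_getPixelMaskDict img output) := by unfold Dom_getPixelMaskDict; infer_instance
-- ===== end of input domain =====

-- B replaces A's pixel-major while-loops (with an 'appended' flag and element-at-a-time appends)
-- by a mask-major decomposition: each "Mask k" list is built whole in one pass over the pixels,
-- and "noMask" by a final pass keeping the pixels whose mask vector holds no True (objective: alternative).

-- ===== PORT A =====
-- Literal port of A.  Where the Python raises (missing 'masks' key, masks[0] / masks[0][0] /
-- masks[c] / maskrow[c2] out of range, or an append to a not-created "Mask k" key) the port
-- returns a default instead; exactly those inputs are excluded by Pre_ below.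
def getPixelMaskDict (img : List (List (List Int))) (output : List (String × List (List (List Bool)))) : List (String × List Int) :=
  match (PySem.Dict.mk output).get? "masks" with
  | none => []                 -- KeyError: outside Pre_
  | some masks =>
    match masks with
    | [] => []                 -- IndexError masks[0]: outside Pre_
    | m0 :: _ =>
      match m0 with
      | [] => []               -- IndexError masks[0][0]: outside Pre_
      | r0 :: _ =>
        let d0 : PySem.Dict String (List Int) := PySem.Dict.empty.insert "noMask" []
        let d1 := (List.range r0.length).foldl
          (fun d count => d.insert ("Mask " ++ PySem.Int.toStr ((count : Int) + 1)) []) d0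
        let d2 := (List.range img.length).foldl (fun d c =>
          let row := img.getD c []
          let maskrow := masks.getD c []      -- masks[c]; out of range raises: outside Pre_
          (List.range row.length).foldl (fun d c2 =>
            let maskval := maskrow.getD c2 []  -- maskrow[c2]; out of range raises: outside Pre_
            let st := (List.range maskval.length).foldl
              (fun (st : PySem.Dict String (List Int) × Bool) c3 =>
                if maskval.getD c3 false then
                  (st.1.modify ("Mask " ++ PySem.Int.toStr ((c3 : Int) + 1)) []
                    (· ++ [(c : Int) * (row.length : Int) + (c2 : Int)]), true)
                else st) (d, false)
            if st.2 = false then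
              st.1.modify "noMask" [] (· ++ [(c : Int) * (row.length : Int) + (c2 : Int)])
            else st.1) d) d1
        d2.items

-- ===== PORT B =====
-- Literal port of Source B (mask-major comprehensions; same raising prologue as A, outside Pre_).
def getPixelMaskDict_alt (img : List (List (List Int))) (output : List (String × List (List (List Bool)))) : List (String × List Int) :=
  match (PySem.Dict.mk output).get? "masks" with
  | none => []
  | some masks =>
    match masks with
    | [] => []
    | m0 :: _ =>
      match m0 with
      | [] => []
      | r0 :: _ =>
        let n := r0.length
        let result := (List.range n).foldl (fun d c3 =>
          d.insert ("Mask " ++ PySem.Int.toStr ((c3 : Int) + 1))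
            ((List.range img.length).flatMap (fun c =>
              (List.range (img.getD c []).length).flatMap (fun c2 =>
                let mv := (masks.getD c []).getD c2 []
                if decide (c3 < mv.length) && mv.getD c3 false then
                  [(c : Int) * ((img.getD c []).length : Int) + (c2 : Int)]
                else []))))
          (PySem.Dict.empty.insert "noMask" ([] : List Int))
        (result.insert "noMask"
          ((List.range img.length).flatMap (fun c =>
            (List.range (img.getD c []).length).flatMap (fun c2 =>
              let mv := (masks.getD c []).getD c2 []
              if !(mv.any (fun v => v)) then
                [(c : Int) * ((img.getD c []).length : Int) + (c2 : Int)]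
              else [])))).items

-- ===== PRECONDITION & SPEC =====
-- Pre_ holds exactly where the Python A returns normally: the 'masks' key exists, masks[0][0]
-- exists, masks covers every img row and every row of img is covered by its mask row, and no
-- True sits at a mask channel ≥ len(masks[0][0]) (there A raises KeyError on the append).
def Pre_getPixelMaskDict (img : List (List (List Int))) (output : List (String × List (List (List Bool)))) : Prop :=
  ∃ masks ∈ ((PySem.Dict.mk output).get? "masks").toList,
    masks.getD 0 [] ≠ [] ∧
    img.length ≤ masks.length ∧
    ∀ c < img.length,
      (img.getD c []).length ≤ (masks.getD c []).length ∧
      ∀ c2 < (img.getD c []).length,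
        ∀ c3 < ((masks.getD c []).getD c2 []).length,
          ((masks.getD c []).getD c2 []).getD c3 false = true →
            c3 < ((masks.getD 0 []).getD 0 []).length
instance (img : List (List (List Int))) (output : List (String × List (List (List Bool)))) : Decidable (Pre_getPixelMaskDict img output) := by unfold Pre_getPixelMaskDict; infer_instance

def pvWitness_getPixelMaskDict : List (List (List Int)) × (List (String × List (List (List Bool)))) :=
  ([[[0]]], [("masks", [[[true]]])])

def Spec_getPixelMaskDict (img : List (List (List Int))) (output : List (String × List (List (List Bool)))) (out : List (String × List Int)) : Prop := out = getPixelMaskDict_alt img output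
instance (img : List (List (List Int))) (output : List (String × List (List (List Bool)))) (out : List (String × List Int)) : Decidable (Spec_getPixelMaskDict img output out) := by unfold Spec_getPixelMaskDict; infer_instance

-- ===== CLAIM (what is proved, stated in full; the proofs are below) =====
def Claim_equal_getPixelMaskDict : Prop := ∀ (img : List (List (List Int))) (output : List (String × List (List (List Bool)))), Dom_getPixelMaskDict img output → Pre_getPixelMaskDict img output → Spec_getPixelMaskDict img output (getPixelMaskDict img output)

-- ===== LEMMAS AND PROOFS =====

-- Canonical descriptions both ports are reduced to ----------------------------------------------
def pvIdx (img : List (List (List Int))) (c c2 : Nat) : Int :=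
  (c : Int) * ((img.getD c []).length : Int) + (c2 : Int)
def pvMv (masks : List (List (List Bool))) (c c2 : Nat) : List Bool :=
  (masks.getD c []).getD c2 []
def pvAnyT (mv : List Bool) : Bool := (List.range mv.length).any (fun c3 => mv.getD c3 false)
def pvKey (k : Nat) : String := "Mask " ++ PySem.Int.toStr ((k : Int) + 1)
def pvAppOf (mv : List Bool) (idx : Int) : List (String × Int) :=
  if pvAnyT mv then
    (List.range mv.length).flatMap (fun c3 => if mv.getD c3 false then [(pvKey c3, idx)] else [])
  else [("noMask", idx)]
def pvApp (img : List (List (List Int))) (masks : List (List (List Bool))) (c c2 : Nat) : List (String × Int) :=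
  pvAppOf (pvMv masks c c2) (pvIdx img c c2)
def pvBig (img : List (List (List Int))) (masks : List (List (List Bool))) : List (String × Int) :=
  (List.range img.length).flatMap (fun c =>
    (List.range (img.getD c []).length).flatMap (fun c2 => pvApp img masks c c2))
def pvMaskL (img : List (List (List Int))) (masks : List (List (List Bool))) (k : Nat) : List Int :=
  (List.range img.length).flatMap (fun c =>
    (List.range (img.getD c []).length).flatMap (fun c2 =>
      if (pvMv masks c c2).getD k false then [pvIdx img c c2] else []))
def pvNoL (img : List (List (List Int))) (masks : List (List (List Bool))) : List Int :=
  (List.range img.length).flatMap (fun c =>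
    (List.range (img.getD c []).length).flatMap (fun c2 =>
      if pvAnyT (pvMv masks c c2) then [] else [pvIdx img c c2]))

-- str(n) is injective on the positive keys ------------------------------------------------------
def pvDec (l : List Char) : Nat := l.foldl (fun a c => 10 * a + (c.toNat - 48)) 0

lemma pvDec_append_digit (l : List Char) (c : Char) :
    pvDec (l ++ [c]) = 10 * pvDec l + (c.toNat - 48) := by
  simp [pvDec, List.foldl_append]

lemma pvDigitChar_toNat (d : Nat) (h : d < 10) : (Nat.digitChar d).toNat - 48 = d := by
  interval_cases d <;> decide

lemma pvDec_toDigits (n : Nat) : pvDec (Nat.toDigits 10 n) = n := by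
  induction n using Nat.strong_induction_on with
  | _ n ih =>
    rw [Nat.toDigits_eq_if (by norm_num)]
    by_cases h : n < 10
    · rw [if_pos h]
      have := pvDigitChar_toNat n h
      simp [pvDec]
      omega
    · rw [if_neg h, pvDec_append_digit, ih (n / 10) (Nat.div_lt_self (by omega) (by omega)),
        pvDigitChar_toNat (n % 10) (Nat.mod_lt _ (by omega))]
      omega

lemma pvToDigits_inj {a b : Nat} (h : Nat.toDigits 10 a = Nat.toDigits 10 b) : a = b := by
  have := congrArg pvDec h
  rwa [pvDec_toDigits, pvDec_toDigits] at this

lemma pvKey_inj : Function.Injective pvKey := by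
  intro i j h
  have h2 := congrArg String.toList h
  simp only [pvKey, PySem.Int.toStr, String.toList_append, String.toList_ofList] at h2
  have h3 := List.append_cancel_left h2
  simp only [PySem.Int.toChars] at h3
  rw [if_neg (by omega), if_neg (by omega)] at h3
  have h4 : ((i : Int) + 1).toNat = ((j : Int) + 1).toNat := pvToDigits_inj h3
  omega

lemma pvKey_ne (k : Nat) : pvKey k ≠ "noMask" := by
  intro h
  have h2 := congrArg String.toList h
  simp only [pvKey, String.toList_append] at h2
  have hM : ("Mask ").toList = ['M', 'a', 's', 'k', ' '] := rfl
  have hN : ("noMask").toList = ['n', 'o', 'M', 'a', 's', 'k'] := rfl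
  rw [hM, hN] at h2
  simp at h2

lemma pvKey_beq_pvKey (i j : Nat) : (pvKey i == pvKey j) = decide (i = j) := by
  by_cases h : i = j
  · simp [h]
  · simp [h]
    exact fun hh => h (pvKey_inj hh)

lemma pvKey_beq_noMask (k : Nat) : (pvKey k == "noMask") = false := by
  simpa using pvKey_ne k

lemma pvNoMask_beq_pvKey (k : Nat) : (("noMask" : String) == pvKey k) = false := by
  rw [beq_eq_false_iff_ne]
  exact fun hh => pvKey_ne k hh.symm

-- small list facts ------------------------------------------------------------------------------
lemma pvSet_update_of_subset (l : List String) (s : PySem.Set String) (h : ∀ x ∈ l, x ∈ s) :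
    s.update l = s := by
  induction l generalizing s with
  | nil => simp [PySem.Set.update_nil]
  | cons x xs ih =>
    rw [PySem.Set.update_cons, PySem.Set.add_of_mem (h x (by simp))]
    exact ih s (fun y hy => h y (by simp [hy]))

lemma pvFlatMapSingle {α : Type} (m k : Nat) (f : Nat → List α) :
    (List.range m).flatMap (fun j => if j = k then f j else []) = if k < m then f k else [] := by
  induction m with
  | zero => simp
  | succ m ih =>
    rw [List.range_succ, List.flatMap_append, ih]
    simp only [List.flatMap_cons, List.flatMap_nil, List.append_nil]
    by_cases h2 : m = k
    · subst h2
      rw [if_neg (Nat.lt_irrefl m), if_pos (Nat.lt_succ_self m), if_pos rfl, List.nil_append]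
    · rw [if_neg h2, List.append_nil]
      by_cases h : k < m
      · rw [if_pos h, if_pos (by omega)]
      · rw [if_neg h, if_neg (by omega)]

lemma pvAnyT_eq (mv : List Bool) : pvAnyT mv = mv.any (fun v => v) := by
  rw [Bool.eq_iff_iff]
  simp only [pvAnyT, List.any_eq_true, List.mem_range]
  constructor
  · rintro ⟨i, hi, h⟩
    rw [List.getD_eq_getElem mv false hi] at h
    exact ⟨mv[i], List.getElem_mem hi, h⟩
  · rintro ⟨x, hx, hxx⟩
    obtain ⟨i, hi, rfl⟩ := List.mem_iff_getElem.mp hx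
    exact ⟨i, hi, by rw [List.getD_eq_getElem mv false hi]; exact hxx⟩

lemma pvAnyT_false_getD (mv : List Bool) (h : pvAnyT mv = false) (k : Nat) :
    mv.getD k false = false := by
  by_cases hk : k < mv.length
  · simp only [pvAnyT, List.any_eq_false, List.mem_range] at h
    simpa using h k hk
  · rw [List.getD_eq_default mv false (by omega)]

lemma pvGuard (l : List Bool) (k : Nat) :
    (decide (k < l.length) && l.getD k false) = l.getD k false := by
  by_cases h : k < l.length
  · simp [h]
  · rw [List.getD_eq_default l false (Nat.le_of_not_lt h)]
    simp [h]

lemma pvNotAny (mv : List Bool) (i : Int) :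
    (if !(mv.any (fun v => v)) then [i] else ([] : List Int)) =
      if pvAnyT mv then [] else [i] := by
  rw [pvAnyT_eq]
  cases h : mv.any (fun v => v) <;> simp

-- A's inner pair-state loop, flattened into a list of (key, index) appends -----------------------
lemma pvFoldPair (maskval : List Bool) (idx : Int) (l : List Nat)
    (d : PySem.Dict String (List Int)) (b : Bool) :
    l.foldl (fun (st : PySem.Dict String (List Int) × Bool) c3 =>
        if maskval.getD c3 false then
          (st.1.modify (pvKey c3) [] (· ++ [idx]), true)
        else st) (d, b)
      = ((l.flatMap (fun c3 => if maskval.getD c3 false then [(pvKey c3, idx)] else [])).foldl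
          (fun d p => d.modify p.1 [] (· ++ [p.2])) d,
        b || l.any (fun c3 => maskval.getD c3 false)) := by
  induction l generalizing d b with
  | nil => simp
  | cons a t ih =>
    simp only [List.foldl_cons, List.flatMap_cons, List.any_cons, List.foldl_append]
    by_cases h : maskval.getD a false = true
    · rw [if_pos h, if_pos h, ih]
      simp only [List.foldl_cons, List.foldl_nil, Prod.mk.injEq]
      exact ⟨by trivial, by rw [h]; simp⟩
    · rw [if_neg h, if_neg h, ih]
      rw [Bool.not_eq_true] at h
      simp only [List.foldl_nil, Prod.mk.injEq]
      exact ⟨by trivial, by rw [h]; simp⟩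

lemma pvPixel (maskval : List Bool) (idx : Int) (d : PySem.Dict String (List Int)) :
    (let st := (List.range maskval.length).foldl
        (fun (st : PySem.Dict String (List Int) × Bool) c3 =>
          if maskval.getD c3 false then
            (st.1.modify (pvKey c3) [] (· ++ [idx]), true)
          else st) (d, false)
      if st.2 = false then st.1.modify "noMask" [] (· ++ [idx]) else st.1)
      = (pvAppOf maskval idx).foldl (fun d p => d.modify p.1 [] (· ++ [p.2])) d := by
  rw [pvFoldPair]
  simp only [Bool.false_or]
  rw [show ((List.range maskval.length).any fun c3 => maskval.getD c3 false) = pvAnyT maskval from rfl]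
  cases h : pvAnyT maskval
  · rw [if_pos rfl]
    have hnil : (List.range maskval.length).flatMap
        (fun c3 => if maskval.getD c3 false = true then [(pvKey c3, idx)] else []) = [] := by
      rw [List.flatMap_eq_nil_iff]
      intro x _
      rw [pvAnyT_false_getD maskval h x]
      simp
    rw [hnil, List.foldl_nil]
    rw [show pvAppOf maskval idx = [("noMask", idx)] from by
      unfold pvAppOf
      rw [if_neg (by rw [h]; exact Bool.false_ne_true)]]
    rfl
  · rw [if_neg (by decide)]
    rw [show pvAppOf maskval idx = (List.range maskval.length).flatMap
        (fun c3 => if maskval.getD c3 false = true then [(pvKey c3, idx)] else []) from by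
      unfold pvAppOf
      rw [if_pos h]]

-- per-pixel filters of the flattened append list -------------------------------------------------
lemma pvFiltMask (img : List (List (List Int))) (masks : List (List (List Bool))) (c c2 k : Nat) :
    ((pvApp img masks c c2).filter (fun p => p.1 == pvKey k)).map (fun x => x.2)
      = if (pvMv masks c c2).getD k false then [pvIdx img c c2] else [] := by
  unfold pvApp pvAppOf
  by_cases hA : pvAnyT (pvMv masks c c2)
  · rw [if_pos hA, List.filter_flatMap, List.map_flatMap]
    have hbody : ∀ j, (List.filter (fun p => p.1 == pvKey k)
          (if (pvMv masks c c2).getD j false then [(pvKey j, pvIdx img c c2)] else [])).map (fun x => x.2)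
        = if j = k then (if (pvMv masks c c2).getD j false then [pvIdx img c c2] else []) else [] := by
      intro j
      by_cases hj : j = k
      · subst hj
        by_cases hg : (pvMv masks c c2).getD j false = true
        · rw [if_pos hg, if_pos hg, if_pos rfl]
          simp
        · rw [if_neg hg, if_neg hg, if_pos rfl]
          simp
      · have hb : (pvKey j == pvKey k) = false := by
          rw [pvKey_beq_pvKey]
          simp [hj]
        by_cases hg : (pvMv masks c c2).getD j false = true
        · rw [if_pos hg, if_neg hj]
          simp [hb]
        · rw [if_neg hg, if_neg hj]
          simp
    simp only [hbody]
    rw [pvFlatMapSingle]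
    by_cases hk : k < (pvMv masks c c2).length
    · rw [if_pos hk]
    · rw [if_neg hk, List.getD_eq_default _ false (by omega)]
      simp
  · rw [if_neg hA, pvAnyT_false_getD _ (by simpa using hA) k]
    simp [pvNoMask_beq_pvKey]
lemma pvFiltNo (img : List (List (List Int))) (masks : List (List (List Bool))) (c c2 : Nat) :
    ((pvApp img masks c c2).filter (fun p => p.1 == "noMask")).map (fun x => x.2)
      = if pvAnyT (pvMv masks c c2) then [] else [pvIdx img c c2] := by
  unfold pvApp pvAppOf
  by_cases hA : pvAnyT (pvMv masks c c2)
  · rw [if_pos hA, if_pos hA, List.filter_flatMap, List.map_flatMap]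
    simp
    intro x _ _
    exact pvKey_ne x
  · simp [hA]

-- the initial dict of empty lists ---------------------------------------------------------------
lemma pvD1_items (n : Nat) :
    (((List.range n).foldl (fun d count => d.insert (pvKey count) [])
        (PySem.Dict.empty.insert "noMask" ([] : List Int)))).items
      = ("noMask", ([] : List Int)) :: (List.range n).map (fun k => (pvKey k, [])) := by
  have hfresh : ∀ a ∈ List.range n,
      (PySem.Dict.empty.insert "noMask" ([] : List Int)).contains (pvKey a) = false := by
    intro a _
    rw [PySem.Dict.contains_insert]
    simp [pvKey_beq_noMask, PySem.Dict.contains_empty]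
  have hnd : ((List.range n).map pvKey).Nodup := (List.nodup_range).map pvKey_inj
  rw [PySem.Dict.items_foldl_insert_fresh (List.range n) pvKey (fun _ => []) _ hfresh hnd]
  rfl

lemma pvD1_getD (n : Nat) (x : String) :
    (((List.range n).foldl (fun d count => d.insert (pvKey count) [])
        (PySem.Dict.empty.insert "noMask" ([] : List Int)))).getD x [] = [] := by
  induction n with
  | zero =>
    simp [PySem.Dict.getD_insert, PySem.Dict.getD_empty]
  | succ n ih =>
    rw [List.range_succ, List.foldl_append]
    simp only [List.foldl_cons, List.foldl_nil]
    rw [PySem.Dict.getD_insert]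
    split <;> simp [ih]

-- every key A's main loop touches already exists in d1 -------------------------------------------
lemma pvBig_keys_sub (img : List (List (List Int))) (masks : List (List (List Bool))) (n : Nat)
    (htrue : ∀ c < img.length, ∀ c2 < (img.getD c []).length, ∀ c3,
      (pvMv masks c c2).getD c3 false = true → c3 < n) :
    ∀ x ∈ (pvBig img masks).map (fun p => p.1),
      x ∈ ("noMask" :: (List.range n).map pvKey : List String) := by
  intro x hx
  simp only [pvBig, List.mem_map, List.mem_flatMap, List.mem_range] at hx
  obtain ⟨p, ⟨c, hc, c2, hc2, hp⟩, rfl⟩ := hx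
  unfold pvApp pvAppOf at hp
  by_cases hA : pvAnyT (pvMv masks c c2)
  · rw [if_pos hA] at hp
    simp only [List.mem_flatMap, List.mem_range] at hp
    obtain ⟨c3, _, hmem⟩ := hp
    by_cases hg : (pvMv masks c c2).getD c3 false
    · rw [if_pos hg] at hmem
      simp only [List.mem_singleton] at hmem
      subst hmem
      have := htrue c hc c2 hc2 c3 hg
      simp [List.mem_map, List.mem_range]
      right
      exact ⟨c3, this, rfl⟩
    · rw [if_neg hg] at hmem
      simp at hmem
  · rw [if_neg hA] at hp
    simp only [List.mem_singleton] at hp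
    subst hp
    simp

-- A's result, characterised ----------------------------------------------------------------------
lemma pvA_items (img : List (List (List Int))) (masks : List (List (List Bool))) (n : Nat)
    (htrue : ∀ c < img.length, ∀ c2 < (img.getD c []).length, ∀ c3,
      (pvMv masks c c2).getD c3 false = true → c3 < n) :
    ((List.range img.length).foldl (fun d c =>
        (List.range (img.getD c []).length).foldl (fun d c2 =>
          let maskval := (masks.getD c []).getD c2 []
          let st := (List.range maskval.length).foldl
            (fun (st : PySem.Dict String (List Int) × Bool) c3 =>
              if maskval.getD c3 false then
                (st.1.modify (pvKey c3) []
                  (· ++ [(c : Int) * (((img.getD c []).length : Nat) : Int) + (c2 : Int)]), true)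
              else st) (d, false)
          if st.2 = false then
            st.1.modify "noMask" [] (· ++ [(c : Int) * (((img.getD c []).length : Nat) : Int) + (c2 : Int)])
          else st.1) d)
      ((List.range n).foldl (fun d count => d.insert (pvKey count) [])
        (PySem.Dict.empty.insert "noMask" [])))
    = PySem.Dict.mk
        (("noMask", pvNoL img masks) :: (List.range n).map (fun k => (pvKey k, pvMaskL img masks k))) := by
  have hpix : ∀ (c c2 : Nat) (d : PySem.Dict String (List Int)),
      (let maskval := (masks.getD c []).getD c2 []
        let st := (List.range maskval.length).foldl
          (fun (st : PySem.Dict String (List Int) × Bool) c3 =>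
            if maskval.getD c3 false then
              (st.1.modify (pvKey c3) []
                (· ++ [(c : Int) * (((img.getD c []).length : Nat) : Int) + (c2 : Int)]), true)
            else st) (d, false)
        if st.2 = false then
          st.1.modify "noMask" [] (· ++ [(c : Int) * (((img.getD c []).length : Nat) : Int) + (c2 : Int)])
        else st.1)
      = (pvApp img masks c c2).foldl (fun d p => d.modify p.1 [] (· ++ [p.2])) d := by
    intro c c2 d
    exact pvPixel ((masks.getD c []).getD c2 []) _ d
  simp only [hpix]
  rw [show (fun (d : PySem.Dict String (List Int)) (c : Nat) =>
      (List.range (img.getD c []).length).foldl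
        (fun d c2 => (pvApp img masks c c2).foldl (fun d p => d.modify p.1 [] (· ++ [p.2])) d) d)
    = (fun d c => ((List.range (img.getD c []).length).flatMap (fun c2 => pvApp img masks c c2)).foldl
        (fun d p => d.modify p.1 [] (· ++ [p.2])) d) from by
      funext d c
      rw [List.foldl_flatMap]]
  rw [show (fun (d : PySem.Dict String (List Int)) (c : Nat) =>
      ((List.range (img.getD c []).length).flatMap (fun c2 => pvApp img masks c c2)).foldl
        (fun d p => d.modify p.1 [] (· ++ [p.2])) d)
    = (fun d c => List.foldl (fun d p => PySem.Dict.modify d p.1 [] (· ++ [p.2])) d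
        ((fun c => (List.range (img.getD c []).length).flatMap (fun c2 => pvApp img masks c c2)) c)) from rfl]
  rw [← List.foldl_flatMap]
  have hfold : List.flatMap (fun c => List.flatMap (fun c2 => pvApp img masks c c2)
      (List.range (img.getD c []).length)) (List.range img.length) = pvBig img masks := rfl
  rw [hfold]
  -- now the goal is about (pvBig img masks).foldl … d1
  have hd1items := pvD1_items n
  have hkeys1 : (((List.range n).foldl (fun d count => d.insert (pvKey count) [])
      (PySem.Dict.empty.insert "noMask" ([] : List Int)))).keys
      = "noMask" :: (List.range n).map pvKey := by
    simp only [PySem.Dict.keys, hd1items, List.map_cons, List.map_map]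
    rfl
  have hnodup1 : (("noMask" : String) :: (List.range n).map pvKey).Nodup := by
    rw [List.nodup_cons]
    refine ⟨?_, (List.nodup_range).map pvKey_inj⟩
    simp only [List.mem_map, List.mem_range]
    rintro ⟨k, _, hk⟩
    exact pvKey_ne k hk
  have hkeys2 : (List.foldl (fun d p => PySem.Dict.modify d p.1 [] (· ++ [p.2]))
      ((List.range n).foldl (fun d count => d.insert (pvKey count) [])
        (PySem.Dict.empty.insert "noMask" ([] : List Int))) (pvBig img masks)).keys
      = "noMask" :: (List.range n).map pvKey := by
    rw [PySem.Dict.keys_foldl_modify_key (pvBig img masks) (fun p => p.1) []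
      (fun _ p => (· ++ [p.2])) _, hkeys1]
    exact pvSet_update_of_subset _ _ (pvBig_keys_sub img masks n htrue)
  have hgetD : ∀ x, (List.foldl (fun d p => PySem.Dict.modify d p.1 [] (· ++ [p.2]))
      ((List.range n).foldl (fun d count => d.insert (pvKey count) [])
        (PySem.Dict.empty.insert "noMask" ([] : List Int))) (pvBig img masks)).getD x []
      = ((pvBig img masks).filter (fun p => p.1 == x)).map (fun p => p.2) := by
    intro x
    rw [PySem.Dict.getD_foldl_modify_append, pvD1_getD]
    simp
  apply PySem.Dict.ext
  rw [PySem.Dict.items_eq_map_keys _ (by rw [hkeys2]; exact hnodup1) ([] : List Int), hkeys2]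
  simp only [List.map_cons, List.map_map, Function.comp_def, hgetD]
  have hnoL : ((pvBig img masks).filter (fun p => p.1 == "noMask")).map (fun p => p.2)
      = pvNoL img masks := by
    simp only [pvBig, List.filter_flatMap, List.map_flatMap, pvNoL]
    congr 1
    funext c
    congr 1
    funext c2
    exact pvFiltNo img masks c c2
  have hmaskL : ∀ k, ((pvBig img masks).filter (fun p => p.1 == pvKey k)).map (fun p => p.2)
      = pvMaskL img masks k := by
    intro k
    simp only [pvBig, List.filter_flatMap, List.map_flatMap, pvMaskL]
    congr 1
    funext c
    congr 1
    funext c2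
    exact pvFiltMask img masks c c2 k
  rw [hnoL]
  simp only [hmaskL]

-- B's result, characterised ----------------------------------------------------------------------
lemma pvB_items (n : Nat) (v : Nat → List Int) (w : List Int) :
    ((((List.range n).foldl (fun d c3 => d.insert (pvKey c3) (v c3))
        (PySem.Dict.empty.insert "noMask" ([] : List Int))).insert "noMask" w)).items
      = ("noMask", w) :: (List.range n).map (fun k => (pvKey k, v k)) := by
  have hfresh : ∀ a ∈ List.range n,
      (PySem.Dict.empty.insert "noMask" ([] : List Int)).contains (pvKey a) = false := by
    intro a _
    rw [PySem.Dict.contains_insert]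
    simp [pvKey_beq_noMask, PySem.Dict.contains_empty]
  have hnd : ((List.range n).map pvKey).Nodup := (List.nodup_range).map pvKey_inj
  have hitems := PySem.Dict.items_foldl_insert_fresh (List.range n) pvKey v _ hfresh hnd
  have hd0 : (PySem.Dict.empty.insert "noMask" ([] : List Int)).items = [("noMask", [])] := rfl
  have hcont : (((List.range n).foldl (fun d c3 => d.insert (pvKey c3) (v c3))
      (PySem.Dict.empty.insert "noMask" ([] : List Int)))).contains "noMask" = true := by
    rw [PySem.Dict.contains_iff_mem_keys]
    simp only [PySem.Dict.keys, hitems, hd0]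
    simp
  rw [PySem.Dict.items_insert_of_contains _ w hcont, hitems, hd0]
  simp [List.map_map]
  intro a _ ha
  exact absurd ha (pvKey_ne a)

-- ===== VERDICT (by name: the statement is the Claim_ definition above) =====
theorem getPixelMaskDict_spec : Claim_equal_getPixelMaskDict := by
  intro img output _ hpre
  unfold Spec_getPixelMaskDict
  obtain ⟨masks, hmem, hne, hlen, hrest⟩ := hpre
  rw [Option.mem_toList] at hmem
  unfold getPixelMaskDict getPixelMaskDict_alt
  rw [hmem]
  rcases masks with _ | ⟨m0, mt⟩
  · exact absurd rfl hne
  rcases m0 with _ | ⟨r0, rt⟩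
  · exact absurd rfl hne
  have hkeyfold : ∀ (k : Nat), ("Mask " ++ PySem.Int.toStr ((k : Int) + 1)) = pvKey k :=
    fun _ => rfl
  simp only [hkeyfold]
  have htrue : ∀ c < img.length, ∀ c2 < (img.getD c []).length, ∀ c3,
      (pvMv ((r0 :: rt) :: mt) c c2).getD c3 false = true → c3 < r0.length := by
    intro c hc c2 hc2 c3 hg
    by_cases hc3 : c3 < (pvMv ((r0 :: rt) :: mt) c c2).length
    · exact (hrest c hc).2 c2 hc2 c3 hc3 hg
    · rw [List.getD_eq_default _ false (by omega)] at hg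
      exact absurd hg (by simp)
  rw [pvA_items img ((r0 :: rt) :: mt) r0.length htrue]
  rw [pvB_items]
  have hguard : ∀ (c3 : Nat) (mv : List Bool) (i : Int),
      (if decide (c3 < mv.length) && mv.getD c3 false then [i] else ([] : List Int))
        = if mv.getD c3 false then [i] else [] := by
    intro c3 mv i
    rw [pvGuard]
  simp only [hguard, pvNotAny]
  rfl
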